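-- pv_equiv track=rewrite | github.com/hanqing-l/15-112-tp | Mint/TP/main.py | filtNames
-- ===== SOURCE A (Python) =====
-- def digitInName(name):
--     for i in range(len(name)):
--         if (name[i].isdigit()):
--             if (i > 0):
--                 if (name[i-1] == ' ') or (name[i-1].isalpha()):
--                     return True
--     return False
--
-- def deleteAfterDigit(name):
--     for i in range(len(name)):
--         if (name[i].isdigit()):
--             name = name[:i]
--             return name
--
-- def filtNames(old):
--     new = []
--     for v in old:
--         # process
--         if (';' in v): v = v[:v.index(';')] # delete after ;
--         if (digitInName(v)):   # has digit, delete after digit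
--             v = deleteAfterDigit(v)
--         # add to newList
--         new.append(v)
--     return new
-- ===== SOURCE B (Python) =====
-- def filtNames(old):
--     out = []
--     for v in old:
--         first = None   # index of first digit before any ';'
--         qual = False   # some digit (at i>0, before any ';') preceded by space or letter
--         cut = None     # index of first ';'
--         prev = None
--         for i, c in enumerate(v):
--             if c == ';':
--                 cut = i
--                 break
--             if c.isdigit():
--                 if first is None:
--                     first = i
--                 if prev is not None and (prev == ' ' or prev.isalpha()):
--                     qual = True
--             prev = c
--         if qual:
--             out.append(v[:first])
--         elif cut is not None:
--             out.append(v[:cut])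
--         else:
--             out.append(v)
--     return out
-- ===== Notes on version B (the rewrite author's own statement) =====
-- stated objective: simpler
-- what changed: A truncates at ';' then runs two separate full-scan helpers (digitInName, deleteAfterDigit); B does one combined scan per string that breaks at ';' while tracking the first digit index and the qualifies flag, then cuts once.
import Mathlib
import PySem

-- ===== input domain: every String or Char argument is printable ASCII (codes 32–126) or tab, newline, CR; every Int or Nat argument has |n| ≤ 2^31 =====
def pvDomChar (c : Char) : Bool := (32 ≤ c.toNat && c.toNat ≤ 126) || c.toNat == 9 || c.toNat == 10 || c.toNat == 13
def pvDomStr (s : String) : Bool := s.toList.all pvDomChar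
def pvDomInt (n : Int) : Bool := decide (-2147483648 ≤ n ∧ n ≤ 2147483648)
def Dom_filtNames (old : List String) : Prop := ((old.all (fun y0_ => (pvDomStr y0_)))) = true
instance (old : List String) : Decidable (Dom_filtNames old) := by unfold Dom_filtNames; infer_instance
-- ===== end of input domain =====

-- B replaces A's semicolon cut plus two digit-scanning helpers by a single scan per string; objective: simpler (one pass, no helpers).

-- ===== PORT A =====
-- for i in range(len(name)): if name[i].isdigit() and i>0 and (name[i-1]==' ' or name[i-1].isalpha()): return True
-- (indices produced by range are always in bounds, so List.getD's default ' ' is never used)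
def pvDigitInName (cs : List Char) : Bool :=
  (List.range cs.length).any fun i =>
    PySem.Chars.isdigit (cs.getD i ' ') && decide (0 < i) &&
      (cs.getD (i - 1) ' ' == ' ' || PySem.Chars.isalpha (cs.getD (i - 1) ' '))

-- first index holding a digit (the i at which deleteAfterDigit returns), none = falls off the loop (Python returns None)
def pvDelIdx : List Char → Option Nat
  | [] => none
  | c :: rest => if PySem.Chars.isdigit c then some 0 else (pvDelIdx rest).map (· + 1)

def pvDeleteAfterDigit (cs : List Char) : Option (List Char) :=
  (pvDelIdx cs).map (fun i => cs.take i)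

def pvProcA (cs : List Char) : List Char :=
  let cs := if PySem.Chars.isIn [';'] cs
            then PySem.List.slice cs none (some (PySem.Chars.find cs [';']))  -- v[:v.index(';')]
            else cs
  if pvDigitInName cs then (pvDeleteAfterDigit cs).getD cs else cs
  -- .getD cs is unreachable: digitInName guarantees a digit exists

def filtNames (old : List String) : List String :=
  old.map fun v => String.ofList (pvProcA v.toList)

-- ===== PORT B =====
def pvPrevOk : Option Char → Bool
  | some p => p == ' ' || PySem.Chars.isalpha p
  | none => false

-- single scan: returns (first digit index, qualifies flag, semicolon index); breaks at ';'
def pvScanB : List Char → Nat → Option Nat → Bool → Option Char → Option Nat × Bool × Option Nat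
  | [], _, first, qual, _ => (first, qual, none)
  | c :: rest, i, first, qual, prev =>
    if c == ';' then (first, qual, some i)
    else pvScanB rest (i + 1)
          (if PySem.Chars.isdigit c && first.isNone then some i else first)
          (qual || (PySem.Chars.isdigit c && pvPrevOk prev))
          (some c)

def pvProcB (cs : List Char) : List Char :=
  match pvScanB cs 0 none false none with
  | (first, qual, cut) =>
    if qual then cs.take (first.getD 0)   -- .getD 0 unreachable: qual implies first is set
    else match cut with
      | some k => cs.take k
      | none => cs

def filtNames_alt (old : List String) : List String :=
  old.map fun v => String.ofList (pvProcB v.toList)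

-- ===== PRECONDITION & SPEC =====
def Spec_filtNames (old : List String) (out : List String) : Prop := out = filtNames_alt old
instance (old : List String) (out : List String) : Decidable (Spec_filtNames old out) := by unfold Spec_filtNames; infer_instance

-- ===== CLAIM (what is proved, stated in full; the proofs are below) =====
def Claim_equal_filtNames : Prop := ∀ (old : List String), Dom_filtNames old → Spec_filtNames old (filtNames old)

-- ===== LEMMAS AND PROOFS =====

/-- pairwise recursion computing "some digit preceded by space/alpha", threading the previous char -/
def qualSpecP (prev : Option Char) : List Char → Bool
  | [] => false
  | c :: rest => (PySem.Chars.isdigit c && pvPrevOk prev) || qualSpecP (some c) rest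

theorem scanB_spec (cs : List Char) (i : Nat) (first : Option Nat) (qual : Bool) (prev : Option Char) :
    pvScanB cs i first qual prev =
      ((if first.isSome then first
        else ((cs.takeWhile (fun c => c != ';')).findIdx? PySem.Chars.isdigit).map (· + i)),
       qual || qualSpecP prev (cs.takeWhile (fun c => c != ';')),
       if ';' ∈ cs then some (i + (cs.takeWhile (fun c => c != ';')).length) else none) := by
  induction cs generalizing i first qual prev with
  | nil => simp [pvScanB, qualSpecP]
  | cons c rest ih =>
    by_cases hc : c = ';'
    · subst hc
      cases first <;> simp [pvScanB, qualSpecP, List.takeWhile]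
    · have hne : (c == ';') = false := by simp [hc]
      have htw : (c :: rest).takeWhile (fun c => c != ';') = c :: rest.takeWhile (fun c => c != ';') := by
        simp [List.takeWhile_cons, hc]
      rw [pvScanB, hne, if_neg (by simp), ih, htw]
      simp only [List.mem_cons, Ne.symm hc, false_or, List.length_cons, List.findIdx?_cons,
        qualSpecP, Prod.mk.injEq]
      refine ⟨?_, ?_, ?_⟩
      · cases first with
        | some a => simp [PySem.Chars.isdigit]
        | none =>
          by_cases hd : PySem.Chars.isdigit c
          · simp [hd]
          · simp [hd, Option.map_map]
            cases h : (rest.takeWhile (fun c => c != ';')).findIdx? PySem.Chars.isdigit <;>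
              simp [h, Function.comp] <;> omega
      · rw [Bool.or_assoc]
      · split <;> simp <;> omega

theorem anyIdx_eq (cs : List Char) (p : Char) :
    ((List.range cs.length).any fun i =>
        PySem.Chars.isdigit (cs.getD i ' ') &&
          ((if i = 0 then p else cs.getD (i - 1) ' ') == ' ' ||
            PySem.Chars.isalpha (if i = 0 then p else cs.getD (i - 1) ' '))) =
      qualSpecP (some p) cs := by
  induction cs generalizing p with
  | nil => simp [qualSpecP]
  | cons c rest ih =>
    rw [List.length_cons, List.range_succ_eq_map, List.any_cons, List.any_map]
    have h2 : ∀ i,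
        ((fun i =>
            PySem.Chars.isdigit ((c :: rest).getD i ' ') &&
              ((if i = 0 then p else (c :: rest).getD (i - 1) ' ') == ' ' ||
                PySem.Chars.isalpha (if i = 0 then p else (c :: rest).getD (i - 1) ' '))) ∘
          Nat.succ) i =
        (fun i =>
            PySem.Chars.isdigit (rest.getD i ' ') &&
              ((if i = 0 then c else rest.getD (i - 1) ' ') == ' ' ||
                PySem.Chars.isalpha (if i = 0 then c else rest.getD (i - 1) ' '))) i := by
      intro i
      cases i <;> simp [Function.comp, List.getD_cons_succ, List.getD]
    rw [List.any_congr rfl h2, ih c, qualSpecP]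
    simp [pvPrevOk]

theorem digitInName_eq (cs : List Char) : pvDigitInName cs = qualSpecP none cs := by
  cases cs with
  | nil => simp [pvDigitInName, qualSpecP]
  | cons c rest =>
    rw [pvDigitInName, List.length_cons, List.range_succ_eq_map, List.any_cons, List.any_map]
    have h2 : ∀ i,
        ((fun i =>
            PySem.Chars.isdigit ((c :: rest).getD i ' ') && decide (0 < i) &&
              ((c :: rest).getD (i - 1) ' ' == ' ' ||
                PySem.Chars.isalpha ((c :: rest).getD (i - 1) ' '))) ∘ Nat.succ) i =
        (fun i =>
            PySem.Chars.isdigit (rest.getD i ' ') &&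
              ((if i = 0 then c else rest.getD (i - 1) ' ') == ' ' ||
                PySem.Chars.isalpha (if i = 0 then c else rest.getD (i - 1) ' '))) i := by
      intro i
      cases i <;> simp [Function.comp, List.getD_cons_succ, List.getD]
    rw [List.any_congr rfl h2, anyIdx_eq rest c, qualSpecP]
    simp [pvPrevOk]

theorem delIdx_eq (cs : List Char) : pvDelIdx cs = cs.findIdx? PySem.Chars.isdigit := by
  induction cs with
  | nil => simp [pvDelIdx]
  | cons c rest ih =>
    rw [pvDelIdx, List.findIdx?_cons, ih]

theorem qual_findIdx (p : Option Char) (cs : List Char) (h : qualSpecP p cs = true) :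
    ∃ j, cs.findIdx? PySem.Chars.isdigit = some j := by
  induction cs generalizing p with
  | nil => simp [qualSpecP] at h
  | cons c rest ih =>
    rw [List.findIdx?_cons]
    by_cases hd : PySem.Chars.isdigit c
    · exact ⟨0, by simp [hd]⟩
    · rw [qualSpecP] at h
      simp [hd] at h
      obtain ⟨j, hj⟩ := ih (some c) h
      exact ⟨j + 1, by simp [hd, hj]⟩

theorem findIdx?_le_length {p : Char → Bool} {cs : List Char} {j : Nat}
    (h : cs.findIdx? p = some j) : j ≤ cs.length := by
  induction cs generalizing j with
  | nil => simp at h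
  | cons c rest ih =>
    rw [List.findIdx?_cons] at h
    split at h
    · simp at h; omega
    · cases hr : rest.findIdx? p with
      | none => simp [hr] at h
      | some k => simp [hr] at h; have := ih hr; simp; omega

theorem take_firstIdx (cs : List Char) (k : Nat) (hk : cs[k]? = some ';')
    (hmin : ∀ i, i < k → cs[i]? ≠ some ';') :
    cs.take k = cs.takeWhile (fun c => c != ';') := by
  induction cs generalizing k with
  | nil => simp at hk
  | cons c rest ih =>
    cases k with
    | zero => simp at hk; simp [List.takeWhile_cons, hk]
    | succ j =>
      have hc : c ≠ ';' := by
        intro h; exact hmin 0 (Nat.succ_pos j) (by simp [h])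
      rw [List.take_succ_cons,
        ih j (by simpa using hk) (fun i hi => by simpa using hmin (i + 1) (by omega))]
      simp [List.takeWhile_cons, hc]

theorem singleton_prefix_iff (a : Char) (l : List Char) : [a] <+: l ↔ l.head? = some a := by
  cases l <;> simp [List.cons_prefix_cons, eq_comm]

theorem takeWhile_of_not_mem (cs : List Char) (h : ';' ∉ cs) :
    cs.takeWhile (fun c => c != ';') = cs := by
  induction cs with
  | nil => rfl
  | cons c rest ih =>
    simp only [List.mem_cons, not_or] at h
    simp [List.takeWhile_cons, Ne.symm h.1, h.1, ih h.2]

theorem semTrunc_eq (cs : List Char) :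
    (if PySem.Chars.isIn [';'] cs
     then PySem.List.slice cs none (some (PySem.Chars.find cs [';']))
     else cs) = cs.takeWhile (fun c => c != ';') := by
  by_cases hm : ';' ∈ cs
  · have hin : PySem.Chars.isIn [';'] cs = true := by
      rw [PySem.Chars.isIn_iff_infix]
      obtain ⟨l1, l2, rfl⟩ := List.append_of_mem hm
      exact ⟨l1, l2, by simp⟩
    have hnn : 0 ≤ PySem.Chars.find cs [';'] := by
      rw [PySem.Chars.find_nonneg_iff, ← PySem.Chars.isIn_iff_infix]; exact hin
    obtain ⟨hpre, hminp⟩ := PySem.Chars.find_spec (s := cs) (sub := [';']) hnn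
    rw [if_pos hin, PySem.List.slice_to cs hnn]
    apply take_firstIdx
    · rw [← List.head?_drop]
      exact (singleton_prefix_iff _ _).mp hpre
    · intro i hi hsome
      exact hminp i hi ((singleton_prefix_iff _ _).mpr (by rw [List.head?_drop]; exact hsome))
  · have hin : PySem.Chars.isIn [';'] cs = false := by
      rw [PySem.Chars.isIn_eq_false_iff]
      intro ⟨l1, l2, h⟩
      exact hm (by rw [← h]; simp)
    rw [if_neg (by simp [hin]), takeWhile_of_not_mem cs hm]

theorem takeWhile_prefix_take (cs : List Char) :
    cs.take (cs.takeWhile (fun c => c != ';')).length = cs.takeWhile (fun c => c != ';') :=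
  (List.prefix_iff_eq_take.mp (List.takeWhile_prefix _)).symm

theorem proc_eq (cs : List Char) : pvProcA cs = pvProcB cs := by
  have ht := takeWhile_prefix_take cs
  set t := cs.takeWhile (fun c => c != ';') with hT
  rw [pvProcA, pvProcB, scanB_spec]
  simp only [Option.isSome_none, Bool.false_eq_true, if_false, Bool.false_or, ← hT]
  rw [semTrunc_eq cs, ← hT, digitInName_eq]
  by_cases hq : qualSpecP none t = true
  · obtain ⟨j, hj⟩ := qual_findIdx none t hq
    have hjl : j ≤ t.length := findIdx?_le_length hj
    rw [if_pos hq, if_pos hq, pvDeleteAfterDigit, delIdx_eq, hj]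
    simp only [Option.map_some, Option.getD_some, Nat.add_zero]
    calc t.take j = (cs.take t.length).take j := by rw [ht]
      _ = cs.take (min j t.length) := by rw [List.take_take]
      _ = cs.take j := by rw [Nat.min_eq_left hjl]
  · rw [if_neg hq, if_neg hq]
    by_cases hm : ';' ∈ cs
    · rw [if_pos hm]; simpa using ht.symm
    · rw [if_neg hm, hT, takeWhile_of_not_mem cs hm]

-- ===== VERDICT (by name: the statement is the Claim_ definition above) =====
theorem filtNames_spec : Claim_equal_filtNames := by
  intro old _
  unfold Spec_filtNames filtNames filtNames_alt
  exact List.map_congr_left fun v _ => by rw [proc_eq]
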